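-- pv_equiv track=rewrite | github.com/poponzu/atcoder1 | atcoder/ABC/176/176a.py | even_odd_count_of_divisors
-- ===== SOURCE A (Python) =====
-- def even_odd_count_of_divisors(n):
--     even = 0
--     odd = 0
--     lower_divisors , upper_divisors = [], []
--     i = 1
--     while i*i <= n:
--         if n % i == 0:
--             #lower_divisors.append(i)
--             if i % 2 == 0:
--                 even += 1
--             else:
--                 odd += 1
--
--             if i != n // i:
--                 #upper_divisors.append(n//i)
--                 if n//i % 2 == 0:
--                     even += 1
--                 else:
--                     odd += 1
--         i += 1
--     if even == odd:
--         return('Same')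
--     elif even > odd:
--         return('Even')
--     else:
--         return('Odd')
-- ===== SOURCE B (Python) =====
-- def even_odd_count_of_divisors(n):
--     if n < 1:
--         return 'Same'
--     a = 0
--     m = n
--     while m % 2 == 0:
--         m //= 2
--         a += 1
--     if a == 0:
--         return 'Odd'
--     if a == 1:
--         return 'Same'
--     return 'Even'
-- ===== Notes on version B (the rewrite author's own statement) =====
-- stated objective: faster
-- what changed: Replaces the O(sqrt n) divisor-enumeration loop with an O(log n) extraction of the exponent of two in n; the verdict follows because the even-divisor count equals that exponent times the odd-divisor count.
import Mathlib
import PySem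

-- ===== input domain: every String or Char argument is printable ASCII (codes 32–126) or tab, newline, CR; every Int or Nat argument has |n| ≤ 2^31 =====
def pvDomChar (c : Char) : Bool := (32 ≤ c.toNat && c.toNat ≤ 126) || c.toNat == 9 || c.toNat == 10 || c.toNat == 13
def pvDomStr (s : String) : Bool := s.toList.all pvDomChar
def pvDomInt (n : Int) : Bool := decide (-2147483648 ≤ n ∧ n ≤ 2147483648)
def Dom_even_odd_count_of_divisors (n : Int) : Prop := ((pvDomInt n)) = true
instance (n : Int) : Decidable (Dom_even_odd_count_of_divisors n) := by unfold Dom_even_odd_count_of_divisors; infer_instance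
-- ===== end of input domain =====

-- B replaces A's O(√n) divisor-enumeration loop by extracting the power of two of n
-- (n = 2^a·m, m odd ⇒ even-divisor count = a · odd-divisor count), for an asymptotically faster program.

-- ===== PORT A =====
-- the while loop of A: state (i, even, odd), returning the final (even, odd)
def pvALoop (n i even odd : Int) : Int × Int :=
  if h : i * i ≤ n then
    let p :=
      if PySem.Int.mod n i = 0 then
        let p1 := if PySem.Int.mod i 2 = 0 then (even + 1, odd) else (even, odd + 1)
        if i ≠ PySem.Int.floordiv n i then
          if PySem.Int.mod (PySem.Int.floordiv n i) 2 = 0 then (p1.1 + 1, p1.2)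
          else (p1.1, p1.2 + 1)
        else p1
      else (even, odd)
    pvALoop n (i + 1) p.1 p.2
  else (even, odd)
termination_by (n + 1 - i).toNat
decreasing_by
  by_cases hi : i ≤ 0
  · have h0 : (0:Int) ≤ i * i := mul_self_nonneg i
    omega
  · have h1 : i ≤ i * i := le_mul_of_one_le_left (by omega) (by omega)
    omega

def even_odd_count_of_divisors (n : Int) : String :=
  let p := pvALoop n 1 0 0
  if p.1 = p.2 then "Same"
  else if p.1 > p.2 then "Even"
  else "Odd"

-- ===== PORT B =====
-- B's `while m % 2 == 0` loop; the `0 < m` conjunct is only a totality guard: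
-- B reaches the loop only with m = n ≥ 1, and then m stays ≥ 1 throughout.
def pvBLoop (m a : Int) : Int :=
  if h : 0 < m ∧ PySem.Int.mod m 2 = 0 then pvBLoop (PySem.Int.floordiv m 2) (a + 1) else a
termination_by m.toNat
decreasing_by
  rw [PySem.Int.floordiv_eq_ediv_of_pos (by norm_num)]
  omega

def even_odd_count_of_divisors_alt (n : Int) : String :=
  if n < 1 then "Same"
  else
    let a := pvBLoop n 0
    if a = 0 then "Odd"
    else if a = 1 then "Same"
    else "Even"

-- ===== PRECONDITION & SPEC =====
def Spec_even_odd_count_of_divisors (n : Int) (out : String) : Prop := out = even_odd_count_of_divisors_alt n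
instance (n : Int) (out : String) : Decidable (Spec_even_odd_count_of_divisors n out) := by unfold Spec_even_odd_count_of_divisors; infer_instance

-- ===== CLAIM (what is proved, stated in full; the proofs are below) =====
def Claim_equal_even_odd_count_of_divisors : Prop := ∀ (n : Int), Dom_even_odd_count_of_divisors n → Spec_even_odd_count_of_divisors n (even_odd_count_of_divisors n)

-- ===== LEMMAS AND PROOFS =====

-- number of divisors of N whose residue mod 2 is r (r = 0: even, r = 1: odd)
def divCnt (N r : ℕ) : ℕ := (N.divisors.filter (fun d => d % 2 = r)).card

-- divisors already counted by A's loop before index k: those with d < k or N/d < k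
def partCnt (N r k : ℕ) : ℕ :=
  (N.divisors.filter (fun d => d % 2 = r ∧ (d < k ∨ N / d < k))).card

-- exponent of 2 in N (0 for N = 0)
def twoVal (N : ℕ) : ℕ :=
  if h : N % 2 = 0 ∧ 0 < N then twoVal (N / 2) + 1 else 0
termination_by N
decreasing_by omega

lemma partCnt_one (N r : ℕ) (hN : 1 ≤ N) : partCnt N r 1 = 0 := by
  unfold partCnt
  rw [Finset.filter_false_of_mem, Finset.card_empty]
  intro d hd
  rw [Nat.mem_divisors] at hd
  have h1 : 0 < d := Nat.pos_of_dvd_of_pos hd.1 (by omega)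
  have h2 : 0 < N / d := Nat.div_pos (Nat.le_of_dvd (by omega) hd.1) h1
  rintro ⟨-, hc⟩
  omega

lemma partCnt_end (N r k : ℕ) (hN : 1 ≤ N) (hk : N < k * k) : partCnt N r k = divCnt N r := by
  unfold partCnt divCnt
  congr 1
  apply Finset.filter_congr
  intro d hd
  rw [Nat.mem_divisors] at hd
  constructor
  · rintro ⟨hr, -⟩; exact hr
  · intro hr
    refine ⟨hr, ?_⟩
    by_contra hc
    push_neg at hc
    have hmul : N / d * d = N := Nat.div_mul_cancel hd.1
    have : k * k ≤ N / d * d := Nat.mul_le_mul hc.2 hc.1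
    omega

lemma partCnt_step (N r k : ℕ) (hN : 1 ≤ N) (hk1 : 1 ≤ k) (hk : k * k ≤ N) :
    partCnt N r (k + 1) =
      partCnt N r k +
        (if k ∣ N then
          (if k % 2 = r then 1 else 0) + (if k ≠ N / k ∧ (N / k) % 2 = r then 1 else 0)
        else 0) := by
  by_cases hdvd : k ∣ N
  · have hNk_dvd : N / k ∣ N := Nat.div_dvd_of_dvd hdvd
    have hkle : k ≤ N / k := (Nat.le_div_iff_mul_le (by omega)).2 hk
    have hNdivk : N / (N / k) = k := Nat.div_div_self hdvd (by omega)
    have hset : N.divisors.filter (fun d => d % 2 = r ∧ (d < k + 1 ∨ N / d < k + 1)) =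
        N.divisors.filter (fun d => d % 2 = r ∧ (d < k ∨ N / d < k)) ∪
        (insert k {N / k} : Finset ℕ).filter (fun d => d % 2 = r) := by
      ext d
      simp only [Finset.mem_filter, Finset.mem_union, Finset.mem_insert, Finset.mem_singleton,
        Nat.mem_divisors]
      constructor
      · rintro ⟨⟨hd, hN0⟩, hr, hlt⟩
        by_cases hc : d < k ∨ N / d < k
        · exact Or.inl ⟨⟨hd, hN0⟩, hr, hc⟩
        · push_neg at hc
          rcases hlt with h1 | h1
          · exact Or.inr ⟨Or.inl (by omega), hr⟩
          · have hdk : N / d = k := by omega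
            have hdN : d = N / k := by rw [← hdk, Nat.div_div_self hd (by omega)]
            exact Or.inr ⟨Or.inr hdN, hr⟩
      · rintro (⟨hmem, hr, hc⟩ | ⟨hd, hr⟩)
        · exact ⟨hmem, hr, by omega⟩
        · rcases hd with rfl | rfl
          · exact ⟨⟨hdvd, by omega⟩, hr, Or.inl (by omega)⟩
          · exact ⟨⟨hNk_dvd, by omega⟩, hr, Or.inr (by rw [hNdivk]; omega)⟩
    have hdisj : Disjoint (N.divisors.filter (fun d => d % 2 = r ∧ (d < k ∨ N / d < k)))
        ((insert k {N / k} : Finset ℕ).filter (fun d => d % 2 = r)) := by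
      rw [Finset.disjoint_left]
      intro d hmem1 hmem2
      simp only [Finset.mem_filter, Finset.mem_insert, Finset.mem_singleton] at hmem1 hmem2
      rcases hmem2.1 with rfl | rfl
      · rcases hmem1.2.2 with h | h <;> omega
      · rcases hmem1.2.2 with h | h
        · omega
        · rw [hNdivk] at h; omega
    unfold partCnt
    rw [hset, Finset.card_union_of_disjoint hdisj, if_pos hdvd]
    congr 1
    by_cases hkk : k = N / k
    · have hne2 : ¬ (k ≠ k ∧ k % 2 = r) := fun hc => hc.1 rfl
      rw [← hkk, Finset.insert_eq_self.2 (Finset.mem_singleton_self k), Finset.filter_singleton,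
        if_neg hne2]
      by_cases h1 : k % 2 = r
      · simp only [if_pos h1, Finset.card_singleton, Nat.add_zero]
      · simp only [if_neg h1, Finset.card_empty, Nat.add_zero]
    · rw [Finset.filter_insert, Finset.filter_singleton]
      by_cases h1 : k % 2 = r <;> by_cases h2 : (N / k) % 2 = r <;>
        simp [h1, h2, hkk, Finset.card_insert_of_notMem, Finset.mem_singleton]
  · rw [if_neg hdvd, add_zero]
    unfold partCnt
    congr 1
    apply Finset.filter_congr
    intro d hd
    rw [Nat.mem_divisors] at hd
    constructor
    · rintro ⟨hr, hc⟩
      refine ⟨hr, ?_⟩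
      rcases hc with h1 | h1
      · rcases Nat.lt_succ_iff_lt_or_eq.1 h1 with h2 | rfl
        · exact Or.inl h2
        · exact absurd hd.1 hdvd
      · rcases Nat.lt_succ_iff_lt_or_eq.1 h1 with h2 | h2
        · exact Or.inr h2
        · exfalso
          have : N / d ∣ N := Nat.div_dvd_of_dvd hd.1
          rw [h2] at this
          exact hdvd this
    · rintro ⟨hr, hc⟩
      exact ⟨hr, by omega⟩

lemma loopA_eq (N k : ℕ) (hN : 1 ≤ N) (hk : 1 ≤ k) :
    pvALoop (N : ℤ) (k : ℤ) ((partCnt N 0 k : ℕ) : ℤ) ((partCnt N 1 k : ℕ) : ℤ) =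
      (((divCnt N 0 : ℕ) : ℤ), ((divCnt N 1 : ℕ) : ℤ)) := by
  by_cases h : k * k ≤ N
  · have hkN : k ≤ N := le_trans (Nat.le_mul_of_pos_left k (by omega)) h
    have hrec := loopA_eq N (k + 1) hN (by omega)
    push_cast at hrec
    rw [pvALoop, dif_pos (by exact_mod_cast h)]
    have hstep0 := partCnt_step N 0 k hN hk h
    have hstep1 := partCnt_step N 1 k hN hk h
    have hmodNk : PySem.Int.mod (N : ℤ) (k : ℤ) = ((N % k : ℕ) : ℤ) := PySem.Int.mod_natCast N k
    have hfd : PySem.Int.floordiv (N : ℤ) (k : ℤ) = ((N / k : ℕ) : ℤ) :=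
      PySem.Int.floordiv_natCast N k
    have hmodk2 : PySem.Int.mod (k : ℤ) (2 : ℤ) = ((k % 2 : ℕ) : ℤ) := by
      exact_mod_cast PySem.Int.mod_natCast k 2
    have hmodq2 : PySem.Int.mod ((N / k : ℕ) : ℤ) (2 : ℤ) = (((N / k) % 2 : ℕ) : ℤ) := by
      exact_mod_cast PySem.Int.mod_natCast (N / k) 2
    by_cases hdvd : k ∣ N
    · have hmk : N % k = 0 := by
        obtain ⟨c, rfl⟩ := hdvd
        exact Nat.mul_mod_right k c
      have hc0 : PySem.Int.mod (N : ℤ) (k : ℤ) = 0 := by rw [hmodNk, hmk]; exact Nat.cast_zero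
      rw [if_pos hdvd] at hstep0 hstep1
      by_cases h2 : k = N / k
      · have hc3 : ¬ ((k : ℤ) ≠ PySem.Int.floordiv (N : ℤ) (k : ℤ)) := by
          rw [hfd]
          exact fun hc => hc (by exact_mod_cast h2)
        by_cases h1 : k % 2 = 0
        · have e0 : partCnt N 0 (k + 1) = partCnt N 0 k + 1 := by
            rw [hstep0, if_pos h1, if_neg (by tauto)]
          have e1 : partCnt N 1 (k + 1) = partCnt N 1 k := by
            rw [hstep1, if_neg (by omega), if_neg (by tauto)]
            omega
          have hc2 : PySem.Int.mod (k : ℤ) 2 = 0 := by rw [hmodk2, h1]; exact Nat.cast_zero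
          rw [if_pos hc0, if_pos hc2, if_neg hc3]
          have hacc0 : ((partCnt N 0 (k + 1) : ℕ) : ℤ) = ((partCnt N 0 k : ℕ) : ℤ) + 1 := by
            rw [e0]; push_cast; ring
          have hacc1 : ((partCnt N 1 (k + 1) : ℕ) : ℤ) = ((partCnt N 1 k : ℕ) : ℤ) := by rw [e1]
          rw [hacc0, hacc1] at hrec
          exact hrec
        · have e0 : partCnt N 0 (k + 1) = partCnt N 0 k := by
            rw [hstep0, if_neg h1, if_neg (by tauto)]
            omega
          have e1 : partCnt N 1 (k + 1) = partCnt N 1 k + 1 := by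
            rw [hstep1, if_pos (by omega), if_neg (by tauto)]
          have hc2 : ¬ PySem.Int.mod (k : ℤ) 2 = 0 := by
            rw [hmodk2]
            intro hc
            exact h1 (by exact_mod_cast hc)
          rw [if_pos hc0, if_neg hc2, if_neg hc3]
          have hacc0 : ((partCnt N 0 (k + 1) : ℕ) : ℤ) = ((partCnt N 0 k : ℕ) : ℤ) := by rw [e0]
          have hacc1 : ((partCnt N 1 (k + 1) : ℕ) : ℤ) = ((partCnt N 1 k : ℕ) : ℤ) + 1 := by
            rw [e1]; push_cast; ring
          rw [hacc0, hacc1] at hrec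
          exact hrec
      · have hc3 : (k : ℤ) ≠ PySem.Int.floordiv (N : ℤ) (k : ℤ) := by
          rw [hfd]
          exact fun hc => h2 (by exact_mod_cast hc)
        by_cases h1 : k % 2 = 0 <;> by_cases h3 : (N / k) % 2 = 0
        · have e0 : partCnt N 0 (k + 1) = partCnt N 0 k + 2 := by
            rw [hstep0, if_pos h1, if_pos ⟨h2, h3⟩]
          have e1 : partCnt N 1 (k + 1) = partCnt N 1 k := by
            rw [hstep1, if_neg (by omega), if_neg (by omega)]
            omega
          have hc2 : PySem.Int.mod (k : ℤ) 2 = 0 := by rw [hmodk2, h1]; exact Nat.cast_zero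
          have hc4 : PySem.Int.mod (PySem.Int.floordiv (N : ℤ) (k : ℤ)) 2 = 0 := by
            rw [hfd, hmodq2, h3]; exact Nat.cast_zero
          rw [if_pos hc0, if_pos hc2, if_pos hc3, if_pos hc4]
          have hacc0 : ((partCnt N 0 (k + 1) : ℕ) : ℤ) = ((partCnt N 0 k : ℕ) : ℤ) + 1 + 1 := by
            rw [e0]; push_cast; ring
          have hacc1 : ((partCnt N 1 (k + 1) : ℕ) : ℤ) = ((partCnt N 1 k : ℕ) : ℤ) := by rw [e1]
          rw [hacc0, hacc1] at hrec
          exact hrec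
        · have e0 : partCnt N 0 (k + 1) = partCnt N 0 k + 1 := by
            rw [hstep0, if_pos h1, if_neg (by omega)]
          have e1 : partCnt N 1 (k + 1) = partCnt N 1 k + 1 := by
            rw [hstep1, if_neg (by omega), if_pos ⟨h2, by omega⟩]
          have hc2 : PySem.Int.mod (k : ℤ) 2 = 0 := by rw [hmodk2, h1]; exact Nat.cast_zero
          have hc4 : ¬ PySem.Int.mod (PySem.Int.floordiv (N : ℤ) (k : ℤ)) 2 = 0 := by
            rw [hfd, hmodq2]
            intro hc
            exact h3 (by exact_mod_cast hc)
          rw [if_pos hc0, if_pos hc2, if_pos hc3, if_neg hc4]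
          have hacc0 : ((partCnt N 0 (k + 1) : ℕ) : ℤ) = ((partCnt N 0 k : ℕ) : ℤ) + 1 := by
            rw [e0]; push_cast; ring
          have hacc1 : ((partCnt N 1 (k + 1) : ℕ) : ℤ) = ((partCnt N 1 k : ℕ) : ℤ) + 1 := by
            rw [e1]; push_cast; ring
          rw [hacc0, hacc1] at hrec
          exact hrec
        · have e0 : partCnt N 0 (k + 1) = partCnt N 0 k + 1 := by
            rw [hstep0, if_neg h1, if_pos ⟨h2, h3⟩]
          have e1 : partCnt N 1 (k + 1) = partCnt N 1 k + 1 := by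
            rw [hstep1, if_pos (by omega), if_neg (by omega)]
          have hc2 : ¬ PySem.Int.mod (k : ℤ) 2 = 0 := by
            rw [hmodk2]
            intro hc
            exact h1 (by exact_mod_cast hc)
          have hc4 : PySem.Int.mod (PySem.Int.floordiv (N : ℤ) (k : ℤ)) 2 = 0 := by
            rw [hfd, hmodq2, h3]; exact Nat.cast_zero
          rw [if_pos hc0, if_neg hc2, if_pos hc3, if_pos hc4]
          have hacc0 : ((partCnt N 0 (k + 1) : ℕ) : ℤ) = ((partCnt N 0 k : ℕ) : ℤ) + 1 := by
            rw [e0]; push_cast; ring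
          have hacc1 : ((partCnt N 1 (k + 1) : ℕ) : ℤ) = ((partCnt N 1 k : ℕ) : ℤ) + 1 := by
            rw [e1]; push_cast; ring
          rw [hacc0, hacc1] at hrec
          exact hrec
        · have e0 : partCnt N 0 (k + 1) = partCnt N 0 k := by
            rw [hstep0, if_neg h1, if_neg (by omega)]
            omega
          have e1 : partCnt N 1 (k + 1) = partCnt N 1 k + 2 := by
            rw [hstep1, if_pos (by omega), if_pos ⟨h2, by omega⟩]
          have hc2 : ¬ PySem.Int.mod (k : ℤ) 2 = 0 := by
            rw [hmodk2]
            intro hc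
            exact h1 (by exact_mod_cast hc)
          have hc4 : ¬ PySem.Int.mod (PySem.Int.floordiv (N : ℤ) (k : ℤ)) 2 = 0 := by
            rw [hfd, hmodq2]
            intro hc
            exact h3 (by exact_mod_cast hc)
          rw [if_pos hc0, if_neg hc2, if_pos hc3, if_neg hc4]
          have hacc0 : ((partCnt N 0 (k + 1) : ℕ) : ℤ) = ((partCnt N 0 k : ℕ) : ℤ) := by rw [e0]
          have hacc1 : ((partCnt N 1 (k + 1) : ℕ) : ℤ) = ((partCnt N 1 k : ℕ) : ℤ) + 1 + 1 := by
            rw [e1]; push_cast; ring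
          rw [hacc0, hacc1] at hrec
          exact hrec
    · have hmk : N % k ≠ 0 := fun hc => hdvd (Nat.dvd_of_mod_eq_zero hc)
      have hc0 : ¬ PySem.Int.mod (N : ℤ) (k : ℤ) = 0 := by
        rw [hmodNk]
        intro hc
        exact hmk (by exact_mod_cast hc)
      rw [if_neg hdvd, add_zero] at hstep0 hstep1
      rw [hstep0, hstep1] at hrec
      rw [if_neg hc0]
      exact hrec
  · rw [pvALoop, dif_neg (by exact_mod_cast h)]
    rw [partCnt_end N 0 k hN (by omega), partCnt_end N 1 k hN (by omega)]
termination_by N + 1 - k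
decreasing_by omega

lemma divCnt_odd_zero (N : ℕ) (h : N % 2 = 1) : divCnt N 0 = 0 := by
  unfold divCnt
  rw [Finset.filter_false_of_mem, Finset.card_empty]
  intro d hd
  rw [Nat.mem_divisors] at hd
  intro hr
  have h2 : (2 : ℕ) ∣ N := dvd_trans (by omega) hd.1
  omega

lemma divCnt_odd_half (M : ℕ) (hM : 1 ≤ M) : divCnt (2 * M) 1 = divCnt M 1 := by
  unfold divCnt
  congr 1
  ext d
  simp only [Finset.mem_filter, Nat.mem_divisors]
  constructor
  · rintro ⟨⟨hd, -⟩, hr⟩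
    refine ⟨⟨?_, by omega⟩, hr⟩
    have hcop : Nat.Coprime d 2 := by
      rw [Nat.coprime_two_right, Nat.odd_iff]
      exact hr
    exact hcop.dvd_of_dvd_mul_left hd
  · rintro ⟨⟨hd, -⟩, hr⟩
    exact ⟨⟨Dvd.dvd.mul_left hd 2, by omega⟩, hr⟩

lemma divCnt_even_half (M : ℕ) (hM : 1 ≤ M) : divCnt (2 * M) 0 = divCnt M 0 + divCnt M 1 := by
  have himg : ((2 * M).divisors.filter (fun d => d % 2 = 0)) =
      M.divisors.image (fun e => 2 * e) := by
    ext d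
    simp only [Finset.mem_filter, Finset.mem_image, Nat.mem_divisors]
    constructor
    · rintro ⟨⟨hdvd, hne⟩, hr⟩
      refine ⟨d / 2, ⟨?_, by omega⟩, by omega⟩
      have hd2 : d = 2 * (d / 2) := by omega
      rw [hd2] at hdvd
      exact (Nat.mul_dvd_mul_iff_left (by norm_num : (0 : ℕ) < 2)).1 hdvd
    · rintro ⟨e, ⟨he, -⟩, rfl⟩
      exact ⟨⟨Nat.mul_dvd_mul_left 2 he, by omega⟩, by omega⟩
  have hfc : (M.divisors.filter (fun d => ¬ d % 2 = 0)) =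
      (M.divisors.filter (fun d => d % 2 = 1)) := by
    apply Finset.filter_congr
    intro d _
    omega
  unfold divCnt
  rw [himg, Finset.card_image_of_injective _ (fun a b hab => by omega), ← hfc,
    ← Finset.card_filter_add_card_filter_not (s := M.divisors) (p := fun d => d % 2 = 0)]

lemma divCnt_eq_twoVal_mul (N : ℕ) (hN : 1 ≤ N) : divCnt N 0 = twoVal N * divCnt N 1 := by
  by_cases h2 : N % 2 = 0
  · have hM1 : 1 ≤ N / 2 := by omega
    have ih := divCnt_eq_twoVal_mul (N / 2) hM1
    have hNM : N = 2 * (N / 2) := by omega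
    have htv : twoVal N = twoVal (N / 2) + 1 := by rw [twoVal, dif_pos ⟨h2, by omega⟩]
    calc divCnt N 0 = divCnt (2 * (N / 2)) 0 := by rw [← hNM]
      _ = divCnt (N / 2) 0 + divCnt (N / 2) 1 := divCnt_even_half _ hM1
      _ = twoVal (N / 2) * divCnt (N / 2) 1 + divCnt (N / 2) 1 := by rw [ih]
      _ = (twoVal (N / 2) + 1) * divCnt (N / 2) 1 := by ring
      _ = twoVal N * divCnt N 1 := by
          rw [htv, ← divCnt_odd_half _ hM1, ← hNM]
  · have htv : twoVal N = 0 := by rw [twoVal, dif_neg (by omega)]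
    rw [divCnt_odd_zero N (by omega), htv, Nat.zero_mul]
termination_by N
decreasing_by omega

lemma divCnt_odd_pos (N : ℕ) (hN : 1 ≤ N) : 1 ≤ divCnt N 1 := by
  unfold divCnt
  refine Finset.card_pos.2 ⟨1, ?_⟩
  simp only [Finset.mem_filter, Nat.mem_divisors]
  exact ⟨⟨⟨N, (one_mul N).symm⟩, by omega⟩, by norm_num⟩

lemma pvBLoop_eq (N : ℕ) (hN : 1 ≤ N) (a : ℤ) : pvBLoop (N : ℤ) a = a + (twoVal N : ℤ) := by
  have hmod : PySem.Int.mod (N : ℤ) (2 : ℤ) = ((N % 2 : ℕ) : ℤ) := by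
    exact_mod_cast PySem.Int.mod_natCast N 2
  rw [pvBLoop]
  by_cases h2 : N % 2 = 0
  · rw [dif_pos ⟨by omega, by rw [hmod, h2]; norm_num⟩]
    rw [show PySem.Int.floordiv (N : ℤ) 2 = ((N / 2 : ℕ) : ℤ) from by
      exact_mod_cast PySem.Int.floordiv_natCast N 2]
    rw [pvBLoop_eq (N / 2) (by omega) (a + 1)]
    rw [show twoVal N = twoVal (N / 2) + 1 from by rw [twoVal, dif_pos ⟨h2, by omega⟩]]
    push_cast
    ring
  · have hg : ¬ (0 < (N : ℤ) ∧ PySem.Int.mod (N : ℤ) 2 = 0) := by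
      rintro ⟨-, hc⟩
      rw [hmod] at hc
      omega
    rw [dif_neg hg, show twoVal N = 0 from by rw [twoVal, dif_neg (by omega)], Nat.cast_zero,
      add_zero]
termination_by N
decreasing_by omega

-- ===== VERDICT (by name: the statement is the Claim_ definition above) =====
theorem even_odd_count_of_divisors_spec : Claim_equal_even_odd_count_of_divisors := by
  intro n _
  unfold Spec_even_odd_count_of_divisors even_odd_count_of_divisors even_odd_count_of_divisors_alt
  by_cases hn : n < 1
  · rw [pvALoop, dif_neg (by omega)]
    simp [hn]
  · have hN1 : 1 ≤ n.toNat := by omega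
    have hn' : ((n.toNat : ℕ) : ℤ) = n := by omega
    have hA := loopA_eq n.toNat 1 hN1 le_rfl
    rw [partCnt_one _ 0 hN1, partCnt_one _ 1 hN1] at hA
    push_cast at hA
    have hB := pvBLoop_eq n.toNat hN1 0
    have hE := divCnt_eq_twoVal_mul n.toNat hN1
    have hO := divCnt_odd_pos n.toNat hN1
    rw [← hn']
    simp only [hA, hB]
    rw [if_neg (show ¬ ((n.toNat : ℕ) : ℤ) < 1 by omega)]
    by_cases hv0 : twoVal n.toNat = 0
    · have hE0 : divCnt n.toNat 0 = 0 := by rw [hE, hv0, Nat.zero_mul]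
      rw [if_neg (by omega), if_neg (by omega), if_pos (by omega)]
    · by_cases hv1 : twoVal n.toNat = 1
      · have hE1 : divCnt n.toNat 0 = divCnt n.toNat 1 := by rw [hE, hv1, Nat.one_mul]
        rw [if_pos (by omega), if_neg (by omega), if_pos (by omega)]
      · have hv2 : 2 ≤ twoVal n.toNat := by omega
        have hE2 : 2 * divCnt n.toNat 1 ≤ divCnt n.toNat 0 := by
          rw [hE]
          exact Nat.mul_le_mul_right _ hv2
        rw [if_neg (by omega), if_pos (by omega), if_neg (by omega), if_neg (by omega)]
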